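-- pv_equiv track=rewrite | github.com/eun-byeol/algorithm | python/implementation/공_이동_시뮬레이션.py | solution
-- ===== SOURCE A (Python) =====
-- def solution(n, m, x, y, queries):
--     x1, y1, x2, y2 = x, y, x, y
--     for cmd, dx in queries[::-1]:
--         if cmd == 0:
--             y2 = min(y2 + dx, m-1)
--             if y1 != 0:
--                 y1 += dx
--         elif cmd == 1:
--             y1 = max(y1 - dx, 0)
--             if y2 != m-1:
--                 y2 -= dx
--         elif cmd == 2:
--             x2 = min(x2 + dx, n-1)
--             if x1 != 0:
--                 x1 += dx
--         else: # cmd == 3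
--             x1 = max(x1 - dx, 0)
--             if x2 != n-1:
--                 x2 -= dx
--         if x2 < 0 or x1 >= n or y2 < 0 or y1 >= m:
--             return 0
--     return (x2-x1+1) * (y2-y1+1)
-- ===== SOURCE B (Python) =====
-- def _axis(bound, start, steps):
--     # steps: list of (kind, d); kind True = grow high end, False = shrink low end,
--     # None = a move of the other axis (state unchanged, bounds still observed).
--     lo = hi = start
--     dead = False
--     for kind, d in steps:
--         if kind is True:
--             hi = min(hi + d, bound - 1)
--             if lo != 0:
--                 lo += d
--         elif kind is False:
--             lo = max(lo - d, 0)
--             if hi != bound - 1: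
--                 hi -= d
--         dead = dead or hi < 0 or lo >= bound
--     return lo, hi, dead
--
--
-- def solution(n, m, x, y, queries):
--     rev = queries[::-1]
--     y1, y2, ydead = _axis(m, y, [(True if c == 0 else False if c == 1 else None, d)
--                                  for c, d in rev])
--     x1, x2, xdead = _axis(n, x, [(None if c in (0, 1) else True if c == 2 else False, d)
--                                  for c, d in rev])
--     if ydead or xdead:
--         return 0
--     return (x2 - x1 + 1) * (y2 - y1 + 1)
-- ===== Notes on version B (the rewrite author's own statement) =====
-- stated objective: alternative
-- what changed: Replaces A's single interleaved loop with early return over four coordinates by two independent per-axis passes: each pass folds a (lo,hi,dead) state for one axis over a pre-mapped step list (grow/shrink/skip) and the final answer is 0 if either sticky dead flag was ever set, else the box area.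
import Mathlib
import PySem

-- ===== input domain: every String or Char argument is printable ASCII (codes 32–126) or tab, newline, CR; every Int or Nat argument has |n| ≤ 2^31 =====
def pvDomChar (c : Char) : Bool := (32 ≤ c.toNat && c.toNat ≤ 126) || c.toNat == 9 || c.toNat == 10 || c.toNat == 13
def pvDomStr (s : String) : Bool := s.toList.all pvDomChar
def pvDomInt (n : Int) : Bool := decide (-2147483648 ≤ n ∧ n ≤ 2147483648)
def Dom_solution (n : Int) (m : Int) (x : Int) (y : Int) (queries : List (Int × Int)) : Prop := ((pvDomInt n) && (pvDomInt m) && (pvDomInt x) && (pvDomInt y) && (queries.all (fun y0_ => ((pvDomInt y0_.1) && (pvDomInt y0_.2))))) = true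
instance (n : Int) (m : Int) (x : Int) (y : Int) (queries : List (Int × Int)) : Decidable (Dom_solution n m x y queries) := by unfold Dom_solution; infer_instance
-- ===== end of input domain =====

-- B replaces A's single interleaved loop (early return on collapse) by two independent
-- per-axis passes over the reversed queries, each folding a (lo, hi, dead) state; same result, same O(q) cost.


-- ===== PORT A =====
-- Port of A: one loop over queries[::-1] carrying (x1,y1,x2,y2), early return 0 on collapse.
def solLoop (n : Int) (m : Int) (x1 : Int) (y1 : Int) (x2 : Int) (y2 : Int) :
    List (Int × Int) → Int
  | [] => (x2 - x1 + 1) * (y2 - y1 + 1)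
  | (cmd, dx) :: rest =>
    let s :=
      if cmd == 0 then
        (x1, (if y1 ≠ 0 then y1 + dx else y1), x2, min (y2 + dx) (m - 1))
      else if cmd == 1 then
        (x1, max (y1 - dx) 0, x2, (if y2 ≠ m - 1 then y2 - dx else y2))
      else if cmd == 2 then
        ((if x1 ≠ 0 then x1 + dx else x1), y1, min (x2 + dx) (n - 1), y2)
      else
        (max (x1 - dx) 0, y1, (if x2 ≠ n - 1 then x2 - dx else x2), y2)
    if s.2.2.1 < 0 ∨ s.1 ≥ n ∨ s.2.2.2 < 0 ∨ s.2.1 ≥ m then 0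
    else solLoop n m s.1 s.2.1 s.2.2.1 s.2.2.2 rest

def solution (n : Int) (m : Int) (x : Int) (y : Int) (queries : List (Int × Int)) : Int :=
  solLoop n m x y x y ((PySem.List.slice? queries none none (-1)).getD [])

-- ===== PORT B =====
-- B: two independent per-axis passes, each a fold of a (lo, hi, dead) state
-- over a pre-mapped step list (some true = grow, some false = shrink, none = other axis).
def stepAxis (bound : Int) (st : Int × Int × Bool) (q : Option Bool × Int) : Int × Int × Bool :=
  let p :=
    match q.1 with
    | some true  => ((if st.1 ≠ 0 then st.1 + q.2 else st.1), min (st.2.1 + q.2) (bound - 1))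
    | some false => (max (st.1 - q.2) 0, (if st.2.1 ≠ bound - 1 then st.2.1 - q.2 else st.2.1))
    | none       => (st.1, st.2.1)
  (p.1, p.2, st.2.2 || decide (p.2 < 0) || decide (p.1 ≥ bound))

def axisPass (bound : Int) (start : Int) (steps : List (Option Bool × Int)) : Int × Int × Bool :=
  steps.foldl (stepAxis bound) (start, start, false)

def yStep (q : Int × Int) : Option Bool × Int :=
  ((if q.1 == 0 then some true else if q.1 == 1 then some false else none), q.2)

def xStep (q : Int × Int) : Option Bool × Int :=
  ((if q.1 == 0 || q.1 == 1 then none else if q.1 == 2 then some true else some false), q.2)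

def solution_alt (n : Int) (m : Int) (x : Int) (y : Int) (queries : List (Int × Int)) : Int :=
  let rev := (PySem.List.slice? queries none none (-1)).getD []
  let yr := axisPass m y (rev.map yStep)
  let xr := axisPass n x (rev.map xStep)
  if yr.2.2 || xr.2.2 then 0
  else (xr.2.1 - xr.1 + 1) * (yr.2.1 - yr.1 + 1)

-- ===== PRECONDITION & SPEC =====
def Spec_solution (n : Int) (m : Int) (x : Int) (y : Int) (queries : List (Int × Int)) (out : Int) : Prop := out = solution_alt n m x y queries
instance (n : Int) (m : Int) (x : Int) (y : Int) (queries : List (Int × Int)) (out : Int) : Decidable (Spec_solution n m x y queries out) := by unfold Spec_solution; infer_instance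

-- ===== CLAIM (what is proved, stated in full; the proofs are below) =====
def Claim_equal_solution : Prop := ∀ (n : Int) (m : Int) (x : Int) (y : Int) (queries : List (Int × Int)), Dom_solution n m x y queries → Spec_solution n m x y queries (solution n m x y queries)

-- ===== LEMMAS AND PROOFS =====

set_option maxHeartbeats 1000000 in
theorem loop_eq (n m : Int) (l : List (Int × Int)) :
    ∀ (x1 y1 x2 y2 : Int) (dy dxb : Bool),
      (if dy = true ∨ dxb = true then 0 else solLoop n m x1 y1 x2 y2 l) =
        (if ((l.map yStep).foldl (stepAxis m) (y1, y2, dy)).2.2 = true ∨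
            ((l.map xStep).foldl (stepAxis n) (x1, x2, dxb)).2.2 = true then 0
         else (((l.map xStep).foldl (stepAxis n) (x1, x2, dxb)).2.1 -
               ((l.map xStep).foldl (stepAxis n) (x1, x2, dxb)).1 + 1) *
              (((l.map yStep).foldl (stepAxis m) (y1, y2, dy)).2.1 -
               ((l.map yStep).foldl (stepAxis m) (y1, y2, dy)).1 + 1)) := by
  induction l with
  | nil => intro x1 y1 x2 y2 dy dxb; rfl
  | cons q t ih =>
    obtain ⟨cmd, dx⟩ := q
    intro x1 y1 x2 y2 dy dxb
    by_cases h0 : cmd = 0 <;> by_cases h1 : cmd = 1 <;> by_cases h2 : cmd = 2 <;>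
      first
      | omega
      | (simp only [solLoop, yStep, xStep, stepAxis, List.map_cons, List.foldl_cons,
          h0, h1, h2, beq_iff_eq, beq_self_eq_true, if_true, if_false, reduceIte,
          decide_true, decide_false, Bool.true_or, Bool.false_or, Bool.or_true,
          Bool.or_eq_true, if_neg, not_false_iff, or_self, or_false, false_or]
         rw [← ih]
         simp only [Bool.or_eq_true, decide_eq_true_eq]
         split_ifs <;> first | rfl | tauto)

-- ===== VERDICT (by name: the statement is the Claim_ definition above) =====
theorem solution_spec : Claim_equal_solution := by
  intro n m x y queries _
  unfold Spec_solution solution solution_alt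
  have h := loop_eq n m ((PySem.List.slice? queries none none (-1)).getD []) x y x y false false
  simp only [Bool.false_eq_true, false_or, Bool.or_eq_true] at h ⊢
  exact h
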